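-- pv_equiv track=rewrite | github.com/yllzxzyq/Nick-life-of-code | 算法题/求最小和.py | minSubArray2
-- ===== SOURCE A (Python) =====
-- def minSubArray2(nums,m) :
--     if m>len(nums):
--         return
--     re = float('inf')
--     for i in range(len(nums)):
--         sum1 = 0
--         for j in range(i,len(nums)):
--             sum1+=nums[j]
--             if j-i>=m-1:
--                 re = min(re,sum1)
--     return re
-- ===== SOURCE B (Python) =====
-- def minSubArray2(nums, m):
--     if m > len(nums):
--         return None
--     k = m if m > 1 else 1
--     pref = [0]
--     s = 0
--     for x in nums:
--         s += x
--         pref.append(s)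
--     best = None
--     maxp = None
--     for j in range(k, len(pref)):
--         p = pref[j - k]
--         if maxp is None or p > maxp:
--             maxp = p
--         t = pref[j] - maxp
--         if best is None or t < best:
--             best = t
--     return best
-- ===== Notes on version B (the rewrite author's own statement) =====
-- stated objective: faster
-- what changed: A's nested loops over all subarrays of length >= m are replaced by one prefix-sum pass that keeps a running maximum of the prefix sums lagged by m positions, so each end index is handled in O(1).
-- outside the precondition, e.g. on minSubArray2([], 0): A returns inf, B returns None
import Mathlib
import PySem

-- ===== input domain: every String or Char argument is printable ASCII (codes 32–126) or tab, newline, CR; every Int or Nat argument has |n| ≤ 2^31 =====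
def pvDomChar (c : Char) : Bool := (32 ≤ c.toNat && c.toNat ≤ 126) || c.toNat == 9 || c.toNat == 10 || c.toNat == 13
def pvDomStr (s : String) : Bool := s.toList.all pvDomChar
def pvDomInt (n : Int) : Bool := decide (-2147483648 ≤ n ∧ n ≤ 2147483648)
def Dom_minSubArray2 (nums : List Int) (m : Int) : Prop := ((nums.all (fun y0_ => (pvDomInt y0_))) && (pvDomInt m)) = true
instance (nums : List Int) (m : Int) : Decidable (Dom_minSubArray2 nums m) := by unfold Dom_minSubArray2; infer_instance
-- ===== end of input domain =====

-- B replaces A's O(n^2) double loop by an O(n) prefix-sum pass that keeps a running maximum of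
-- the earlier prefix sums; return values agree on Pre_ (proved below).

-- ===== PORT A =====
-- Python's 'min(re, sum1)' where re starts at float('inf'): none models the initial inf
def pvOmin (a : Option Int) (s : Int) : Option Int :=
  match a with
  | none => some s
  | some r => some (min r s)

-- body of A's inner 'for j in range(i, len(nums))' loop
def pvInnerBodyA (nums : List Int) (m i : Int) (st : Int × Option Int) (j : Int) : Int × Option Int :=
  let sum1 := st.1 + PySem.List.pyGetD nums j 0
  (sum1, if j - i ≥ m - 1 then pvOmin st.2 sum1 else st.2)

def minSubArray2 (nums : List Int) (m : Int) : Option Int :=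
  if m > (nums.length : Int) then none
  else
    (PySem.List.pyRange 0 (nums.length : Int) 1).foldl
      (fun re i =>
        ((PySem.List.pyRange i (nums.length : Int) 1).foldl (pvInnerBodyA nums m i) (0, re)).2)
      none

-- ===== PORT B =====
-- body of B's single 'for j in range(k, len(pref))' loop; state = (maxp, best)
def pvStepB (pref : List Int) (k : Int) (st : Option Int × Option Int) (j : Int) : Option Int × Option Int :=
  let p := PySem.List.pyGetD pref (j - k) 0
  let maxp : Int :=
    match st.1 with
    | none => p
    | some mp => if p > mp then p else mp
  let t := PySem.List.pyGetD pref j 0 - maxp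
  let best : Option Int :=
    match st.2 with
    | none => some t
    | some b => if t < b then some t else some b
  (some maxp, best)

def minSubArray2_alt (nums : List Int) (m : Int) : Option Int :=
  if m > (nums.length : Int) then none
  else
    let k : Int := if m > 1 then m else 1
    let sp := nums.foldl (fun (st : Int × List Int) x => (st.1 + x, st.2 ++ [st.1 + x])) (0, [0])
    let pref := sp.2
    ((PySem.List.pyRange k (pref.length : Int) 1).foldl (pvStepB pref k) (none, none)).2

-- ===== PRECONDITION & SPEC =====
-- Pre_ excludes only the empty list with m ≤ 0, where A returns float('inf'): not an int value
-- of the declared Optional[int] return type (B naturally returns None there).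
def Pre_minSubArray2 (nums : List Int) (m : Int) : Prop := ¬(nums = [] ∧ m ≤ 0)
instance (nums : List Int) (m : Int) : Decidable (Pre_minSubArray2 nums m) := by
  unfold Pre_minSubArray2; infer_instance

def pvWitness_minSubArray2 : List Int × Int := ([1, -2, 3], 2)

def Spec_minSubArray2 (nums : List Int) (m : Int) (out : Option Int) : Prop := out = minSubArray2_alt nums m
instance (nums : List Int) (m : Int) (out : Option Int) : Decidable (Spec_minSubArray2 nums m out) := by
  unfold Spec_minSubArray2; infer_instance

-- ===== CLAIM (what is proved, stated in full; the proofs are below) =====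
def Claim_equal_minSubArray2 : Prop := ∀ (nums : List Int) (m : Int), Dom_minSubArray2 nums m → Pre_minSubArray2 nums m → Spec_minSubArray2 nums m (minSubArray2 nums m)

-- ===== LEMMAS AND PROOFS =====

-- prefix sum of the first t elements
def pvP (nums : List Int) (t : ℕ) : Int := (nums.take t).sum

-- fold of pvOmin over a list (running min against an inf-or-int accumulator)
def pvOminL (a : Option Int) (l : List Int) : Option Int := l.foldl pvOmin a

-- running max of pvP over indices < d (seeded with pvP 0)
def pvMx (nums : List Int) (d : ℕ) : Int :=
  ((List.range d).map (pvP nums)).foldl max (pvP nums 0)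

-- row i of the pair triangle: P j - P i for j ∈ [i+K, n]
def pvRowL (nums : List Int) (K i : ℕ) : List Int :=
  ((List.range (nums.length + 1)).filter (fun j => decide (i + K ≤ j))).map
    (fun j => pvP nums j - pvP nums i)

-- column j of the pair triangle: P j - P i for i ∈ [0, j-K]
def pvColL (nums : List Int) (K j : ℕ) : List Int :=
  ((List.range nums.length).filter (fun i => decide (i + K ≤ j))).map
    (fun i => pvP nums j - pvP nums i)

theorem pvOmin_right_comm (z : Option Int) (x y : Int) :
    pvOmin (pvOmin z x) y = pvOmin (pvOmin z y) x := by
  cases z <;> simp [pvOmin, min_assoc, min_comm x y]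

theorem pvOminL_append (a : Option Int) (l l' : List Int) :
    pvOminL a (l ++ l') = pvOminL (pvOminL a l) l' := by
  simp [pvOminL, List.foldl_append]

theorem pvOminL_perm (a : Option Int) {l l' : List Int} (h : l.Perm l') :
    pvOminL a l = pvOminL a l' :=
  @List.Perm.foldl_eq _ _ pvOmin _ _ ⟨fun b x y => pvOmin_right_comm b x y⟩ h a

theorem pvOminL_cons_min (a : Option Int) (x : Int) (l : List Int) :
    pvOminL a (x :: l) = pvOmin a (l.foldl min x) := by
  cases a with
  | none =>
    simp [pvOminL, pvOmin]
    induction l generalizing x with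
    | nil => simp [pvOmin]
    | cons y t ih => simp [List.foldl_cons, pvOmin, ih]
  | some r =>
    simp [pvOminL, pvOmin]
    rw [show min r (List.foldl min x l) = List.foldl min (min r x) l from
      (@List.foldl_assoc _ min ⟨min_assoc⟩ l r x).symm]
    induction l generalizing r x with
    | nil => simp [pvOmin]
    | cons y t ih => simp [List.foldl_cons, pvOmin, ih]

theorem sub_foldl_max (l : List ℕ) (h : ℕ → Int) (c a : Int) :
    (l.map (fun u => c - h u)).foldl min (c - a) = c - (l.map h).foldl max a := by
  induction l generalizing a with
  | nil => simp
  | cons y t ih =>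
    simp only [List.map_cons, List.foldl_cons]
    rw [show min (c - a) (c - h y) = c - max a (h y) by omega]
    exact ih (max a (h y))

theorem flatMap_ite_singleton {α β : Type} (bs : List α) (p : α → Bool) (f : α → β) :
    (bs.flatMap (fun b => if p b then [f b] else [])) = (bs.filter p).map f := by
  induction bs with
  | nil => simp
  | cons b t ih => by_cases h : p b <;> simp [List.flatMap_cons, h, ih]

theorem flatMap_append_perm {α β : Type} (bs : List α) (g h : α → List β) :
    (bs.flatMap (fun b => g b ++ h b)).Perm (bs.flatMap g ++ bs.flatMap h) := by
  induction bs with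
  | nil => simp
  | cons b t ih =>
    simp only [List.flatMap_cons]
    calc (g b ++ h b ++ t.flatMap fun b => g b ++ h b).Perm
          (g b ++ h b ++ (t.flatMap g ++ t.flatMap h)) := by
            exact List.Perm.append_left _ ih
      _ = g b ++ (h b ++ t.flatMap g ++ t.flatMap h) := by simp [List.append_assoc]
      _ |>.Perm (g b ++ (t.flatMap g ++ h b ++ t.flatMap h)) := by
            refine List.Perm.append_left _ ?_
            simpa using (List.perm_append_comm (l₁ := h b) (l₂ := t.flatMap g)).append_right _
      _ = g b ++ t.flatMap g ++ (h b ++ t.flatMap h) := by simp [List.append_assoc]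

theorem transpose_perm {α β γ : Type} (as : List α) (bs : List β) (p : α → β → Bool)
    (f : α → β → γ) :
    (as.flatMap (fun a => (bs.filter (p a)).map (f a))).Perm
      (bs.flatMap (fun b => ((as.filter (fun x => p x b)).map (fun x => f x b)))) := by
  induction as with
  | nil => simp
  | cons a t ih =>
    simp only [List.flatMap_cons]
    have step : ∀ b, ((a :: t).filter (fun x => p x b)).map (fun x => f x b) =
        (if p a b then [f a b] else []) ++ (t.filter (fun x => p x b)).map (fun x => f x b) := by
      intro b; by_cases h : p a b <;> simp [List.filter_cons, h]
    rw [show (fun b => ((a :: t).filter (fun x => p x b)).map (fun x => f x b)) =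
        (fun b => (if p a b then [f a b] else []) ++ (t.filter (fun x => p x b)).map (fun x => f x b))
        from funext step]
    refine List.Perm.trans ?_ (flatMap_append_perm bs _ _).symm
    rw [flatMap_ite_singleton bs (fun b => p a b) (fun b => f a b)]
    exact List.Perm.append_left _ ih

theorem filter_range_ge (c a : ℕ) :
    (List.range c).filter (fun t => decide (a ≤ t)) = List.range' a (c - a) := by
  induction c with
  | zero => simp
  | succ n ih =>
    rw [List.range_succ, List.filter_append, ih]
    by_cases h : a ≤ n
    · rw [show n + 1 - a = (n - a) + 1 by omega, List.range'_concat]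
      rw [show a + 1 * (n - a) = n by omega]
      simp [h]
    · simp [h, show n + 1 - a = 0 by omega, show n - a = 0 by omega]

theorem filter_range_lt (c a : ℕ) :
    (List.range c).filter (fun t => decide (t < a)) = List.range (min a c) := by
  induction c with
  | zero => simp
  | succ n ih =>
    rw [List.range_succ, List.filter_append, ih]
    by_cases h : n < a
    · simp [h, show min a (n + 1) = min a n + 1 by omega, List.range_succ, show min a n = n by omega]
    · simp [h, show min a (n + 1) = min a n by omega]

theorem foldl_ominL_flatMap {α : Type} (l : List α) (g : α → List Int) (a : Option Int) :
    l.foldl (fun acc x => pvOminL acc (g x)) a = pvOminL a (l.flatMap g) := by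
  induction l generalizing a with
  | nil => simp [pvOminL]
  | cons x t ih =>
    simp only [List.foldl_cons, List.flatMap_cons, pvOminL, List.foldl_append] at *; rw [ih]

theorem ominL_flatMap_collapse (l : List ℕ) (g : ℕ → List Int) (w : ℕ → Int)
    (h : ∀ t ∈ l, ∀ a, pvOminL a (g t) = pvOmin a (w t)) (a : Option Int) :
    pvOminL a (l.flatMap g) = pvOminL a (l.map w) := by
  induction l generalizing a with
  | nil => simp
  | cons x t ih =>
    simp only [List.flatMap_cons, List.map_cons]
    rw [pvOminL_append, h x (by simp)]
    have : ∀ a', pvOminL a' (w x :: t.map w) = pvOminL (pvOmin a' (w x)) (t.map w) := fun _ => rfl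
    rw [this, ih (fun u hu a' => h u (by simp [hu]) a')]

theorem pref_spec (nums : List Int) (s : Int) (acc : List Int) :
    nums.foldl (fun (st : Int × List Int) x => (st.1 + x, st.2 ++ [st.1 + x])) (s, acc) =
      (s + nums.sum, acc ++ (List.range nums.length).map (fun t => s + (nums.take (t + 1)).sum)) := by
  induction nums generalizing s acc with
  | nil => simp
  | cons x t ih =>
    rw [List.foldl_cons, ih]
    simp only [Prod.mk.injEq, List.length_cons, List.range_succ_eq_map, List.map_cons,
      List.map_map, List.sum_cons, List.take_succ_cons]
    constructor
    · ring
    · simp [List.append_assoc, add_assoc]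

theorem pref_eq (nums : List Int) :
    (nums.foldl (fun (st : Int × List Int) x => (st.1 + x, st.2 ++ [st.1 + x])) (0, [0])).2 =
      (List.range (nums.length + 1)).map (pvP nums) := by
  rw [pref_spec]
  simp [pvP, List.range_succ_eq_map, List.map_map, Function.comp_def]

theorem pvMx_succ (nums : List Int) (d : ℕ) :
    pvMx nums (d + 1) = max (pvMx nums d) (pvP nums d) := by
  simp [pvMx, List.range_succ, List.foldl_append]

theorem pvMx_alt (nums : List Int) (d : ℕ) :
    pvMx nums (d + 1) = ((List.range d).map (fun u => pvP nums (u + 1))).foldl max (pvP nums 0) := by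
  simp [pvMx, List.range_succ_eq_map, List.map_map, Function.comp_def]

theorem row_eq (nums : List Int) (m : Int) (K i : ℕ)
    (hK : (K : Int) = if m > 1 then m else 1) :
    ((List.range (nums.length - i)).filter (fun t => decide ((m - 1 : Int) ≤ (t : ℕ)))).map
      (fun t => pvP nums (i + t + 1) - pvP nums i) = pvRowL nums K i := by
  have hK1 : 1 ≤ K := by by_cases h : m > 1 <;> simp [h] at hK <;> omega
  have hcond : ∀ t : ℕ, (decide ((m - 1 : Int) ≤ (t : ℕ))) = (decide (K - 1 ≤ t)) := by
    intro t
    by_cases h : m > 1 <;> simp [h] at hK <;> simp [decide_eq_decide] <;> omega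
  rw [List.filter_congr (fun t _ => hcond t), filter_range_ge]
  unfold pvRowL
  rw [filter_range_ge, List.range'_eq_map_range, List.range'_eq_map_range, List.map_map,
    List.map_map]
  rw [show nums.length + 1 - (i + K) = nums.length - i - (K - 1) by omega]
  apply List.map_congr_left
  intro u _
  simp only [Function.comp_apply]
  congr 2
  omega

theorem innerA (nums : List Int) (m : Int) (i : ℕ) (re : Option Int) (c : ℕ)
    (hc : i + c ≤ nums.length) :
    (List.range c).foldl (fun st t => pvInnerBodyA nums m (i : ℕ) st ((i : Int) + (t : ℕ))) (0, re)
      = (pvP nums (i + c) - pvP nums i,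
         pvOminL re (((List.range c).filter (fun t => decide ((m - 1 : Int) ≤ (t : ℕ)))).map
           (fun t => pvP nums (i + t + 1) - pvP nums i))) := by
  induction c with
  | zero => simp [pvP, pvOminL]
  | succ d ih =>
    rw [List.range_succ, List.foldl_append, ih (by omega), List.filter_append, List.map_append,
      pvOminL_append]
    have hlt : i + d < nums.length := by omega
    have hget : PySem.List.pyGetD nums ((i : Int) + (d : ℕ)) 0 = nums[i + d] := by
      rw [show ((i : Int) + (d : ℕ)) = ((i + d : ℕ) : Int) by push_cast; ring,
        PySem.List.pyGetD_natCast, List.getD_eq_getElem nums 0 hlt]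
    have hsum : pvP nums (i + d) - pvP nums i + nums[i + d] = pvP nums (i + d + 1) - pvP nums i := by
      have := List.sum_take_succ nums (i + d) hlt
      simp [pvP] at *; omega
    simp only [List.foldl_cons, List.foldl_nil, pvInnerBodyA, hget]
    rw [show i + (d + 1) = i + d + 1 from rfl]
    by_cases hcond : (m - 1 : Int) ≤ (d : ℕ)
    · rw [List.filter_cons_of_pos (by simpa using hcond), if_pos (by omega)]
      simp only [List.filter_nil, List.map_cons, List.map_nil, Prod.mk.injEq]
      exact ⟨hsum, by simp [pvOminL, hsum]⟩
    · rw [List.filter_cons_of_neg (by simpa using hcond), if_neg (by omega)]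
      simp only [List.filter_nil, List.map_nil, Prod.mk.injEq]
      exact ⟨hsum, by simp [pvOminL]⟩

theorem A_char (nums : List Int) (m : Int) (K : ℕ)
    (hm : ¬ m > (nums.length : Int)) (hK : (K : Int) = if m > 1 then m else 1) :
    minSubArray2 nums m = pvOminL none ((List.range nums.length).flatMap (pvRowL nums K)) := by
  unfold minSubArray2
  rw [if_neg hm, PySem.List.pyRange_one,
    show ((nums.length : Int) - 0).toNat = nums.length by omega, List.foldl_map]
  rw [PySem.List.foldl_congr_mem _ _ (fun re iN => pvOminL re (pvRowL nums K iN)) none ?_]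
  · rw [foldl_ominL_flatMap]
  · intro acc iN hmem
    rw [List.mem_range] at hmem
    simp only [zero_add]
    rw [PySem.List.pyRange_one,
      show ((nums.length : Int) - (iN : ℕ)).toNat = nums.length - iN by omega, List.foldl_map,
      innerA nums m iN acc (nums.length - iN) (by omega)]
    rw [row_eq nums m K iN hK]

theorem innerB (nums : List Int) (K : ℕ) (c : ℕ) (hc : c + K ≤ nums.length + 1) :
    (List.range c).foldl
        (fun st t => pvStepB ((List.range (nums.length + 1)).map (pvP nums)) (K : Int) st ((K : Int) + (t : ℕ)))
        (none, none)
      = ((if c = 0 then none else some (pvMx nums c)),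
         pvOminL none ((List.range c).map (fun t => pvP nums (K + t) - pvMx nums (t + 1)))) := by
  induction c with
  | zero => simp [pvOminL]
  | succ d ih =>
    rw [show List.range (d + 1) = List.range d ++ [d] from List.range_succ,
      List.foldl_append, ih (by omega), List.map_append, pvOminL_append]
    have hp : PySem.List.pyGetD ((List.range (nums.length + 1)).map (pvP nums)) (((K : Int) + (d : ℕ)) - (K : Int)) 0 = pvP nums d := by
      rw [show ((K : Int) + (d : ℕ)) - (K : Int) = ((d : ℕ) : Int) by ring, PySem.List.pyGetD_natCast,
        PySem.List.getD_map_range _ _ _ _ (by omega)]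
    have hq : PySem.List.pyGetD ((List.range (nums.length + 1)).map (pvP nums)) ((K : Int) + (d : ℕ)) 0 = pvP nums (K + d) := by
      rw [show ((K : Int) + (d : ℕ)) = ((K + d : ℕ) : Int) by push_cast; ring, PySem.List.pyGetD_natCast,
        PySem.List.getD_map_range _ _ _ _ (by omega)]
    simp only [List.foldl_cons, List.foldl_nil, pvStepB, hp, hq]
    by_cases hd : d = 0
    · subst hd
      simp [pvMx, pvOminL, pvOmin]
    · rw [if_neg hd, if_neg (by omega)]
      have hmax : (if pvP nums d > pvMx nums d then pvP nums d else pvMx nums d) = pvMx nums (d + 1) := by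
        rw [pvMx_succ]; split_ifs <;> omega
      have hbest : ∀ (b : Option Int) (t : Int),
          (match b with
           | none => some t
           | some b => if t < b then some t else some b) = pvOmin b t := by
        intro b t; cases b with
        | none => rfl
        | some b =>
          simp only [pvOmin]
          split_ifs with h <;> (congr 1; omega)
      simp only [hmax, hbest]
      simp [pvOminL]

theorem B_char (nums : List Int) (m : Int) (K : ℕ)
    (hm : ¬ m > (nums.length : Int)) (hK : (K : Int) = if m > 1 then m else 1)
    (hKn : K ≤ nums.length) :
    minSubArray2_alt nums m =
      pvOminL none ((List.range (nums.length + 1 - K)).map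
        (fun t => pvP nums (K + t) - pvMx nums (t + 1))) := by
  unfold minSubArray2_alt
  rw [if_neg hm]
  simp only [← hK, pref_eq]
  rw [show (((List.range (nums.length + 1)).map (pvP nums)).length : Int) = ((nums.length + 1 : ℕ) : Int) by simp,
    PySem.List.pyRange_one,
    show (((nums.length + 1 : ℕ) : Int) - (K : Int)).toNat = nums.length + 1 - K by omega,
    List.foldl_map, innerB nums K (nums.length + 1 - K) (by omega)]

theorem col_collapse (nums : List Int) (K t : ℕ) (hK1 : 1 ≤ K) (h : K + t ≤ nums.length)
    (a : Option Int) :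
    pvOminL a (pvColL nums K (K + t)) = pvOmin a (pvP nums (K + t) - pvMx nums (t + 1)) := by
  unfold pvColL
  have hcond : ∀ i : ℕ, (decide (i + K ≤ K + t)) = (decide (i < t + 1)) := by
    intro i; simp [decide_eq_decide]; omega
  rw [List.filter_congr (fun i _ => hcond i), filter_range_lt,
    show min (t + 1) nums.length = t + 1 by omega, List.range_succ_eq_map, List.map_cons,
    List.map_map, pvOminL_cons_min]
  congr 1
  rw [show List.map ((fun i => pvP nums (K + t) - pvP nums i) ∘ Nat.succ) (List.range t) =
      List.map (fun u => pvP nums (K + t) - pvP nums (u + 1)) (List.range t) from rfl,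
    sub_foldl_max (List.range t) (fun u => pvP nums (u + 1)) (pvP nums (K + t)) (pvP nums 0),
    ← pvMx_alt]

theorem cols_eq (nums : List Int) (K : ℕ) (hK1 : 1 ≤ K) (hKn : K ≤ nums.length) :
    pvOminL none ((List.range (nums.length + 1)).flatMap (pvColL nums K)) =
      pvOminL none ((List.range (nums.length + 1 - K)).map
        (fun t => pvP nums (K + t) - pvMx nums (t + 1))) := by
  rw [show nums.length + 1 = K + (nums.length + 1 - K) by omega, List.range_add,
    List.flatMap_append, pvOminL_append]
  have h1 : (List.range K).flatMap (pvColL nums K) = [] := by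
    rw [List.flatMap_eq_nil_iff]
    intro j hj
    rw [List.mem_range] at hj
    unfold pvColL
    rw [List.filter_eq_nil_iff.mpr (by intro i _; simp; omega)]
    simp
  rw [h1]
  have h2 : pvOminL none ([] : List Int) = none := rfl
  rw [h2, List.flatMap_map,
    show K + (nums.length + 1 - K) - K = nums.length + 1 - K by omega]
  exact ominL_flatMap_collapse (List.range (nums.length + 1 - K))
    (fun t => pvColL nums K (K + t))
    (fun t => pvP nums (K + t) - pvMx nums (t + 1))
    (fun t ht a => col_collapse nums K t hK1
      (by rw [List.mem_range] at ht; omega) a) none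

-- ===== VERDICT (by name: the statement is the Claim_ definition above) =====
theorem minSubArray2_spec : Claim_equal_minSubArray2 := by
  unfold Claim_equal_minSubArray2 Spec_minSubArray2 Pre_minSubArray2
  intro nums m _ hpre
  by_cases hm : m > (nums.length : Int)
  · unfold minSubArray2 minSubArray2_alt
    rw [if_pos hm, if_pos hm]
  · have hn : 1 ≤ nums.length := by
      cases nums with
      | nil => exact absurd ⟨rfl, by simpa using hm⟩ hpre
      | cons y t => simp
    have hK : (((if m > 1 then m else 1).toNat : ℕ) : Int) = if m > 1 then m else 1 := by
      by_cases h : m > 1 <;> simp [h] <;> omega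
    set K : ℕ := (if m > 1 then m else 1).toNat with hKdef
    have hK1 : 1 ≤ K := by by_cases h : m > 1 <;> simp [hKdef, h] <;> omega
    have hKn : K ≤ nums.length := by
      by_cases h : m > 1 <;> simp [h] at hK <;> omega
    rw [A_char nums m K hm hK, B_char nums m K hm hK hKn, ← cols_eq nums K hK1 hKn]
    apply pvOminL_perm
    have := transpose_perm (List.range nums.length) (List.range (nums.length + 1))
      (fun i j => decide (i + K ≤ j)) (fun i j => pvP nums j - pvP nums i)
    simpa only [pvRowL, pvColL] using this
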